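-- pv_equiv track=rewrite | github.com/prudhvirajboddu/Programming | hackerrank/breaking_rec.py | breaking
-- ===== SOURCE A (Python) =====
-- def breaking(scores=[]):
--     maxi=mini=scores[0]
--     lmin=lmax=0
--     for i in scores:
--         if i>maxi:
--             maxi=i
--             lmax+=1
--         elif i<mini:
--             mini=i
--             lmin+=1
--     return [lmax,lmin]
-- ===== SOURCE B (Python) =====
-- def breaking(scores=[]):
--     m = M = scores[0]
--     rmax = [(M := x if x > M else M) for x in scores]
--     rmin = [(m := x if x < m else m) for x in scores]
--     lmax = sum(1 for a, b in zip(rmax, rmax[1:]) if b > a)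
--     lmin = sum(1 for a, b in zip(rmin, rmin[1:]) if b < a)
--     return [lmax, lmin]
-- ===== Notes on version B (the rewrite author's own statement) =====
-- stated objective: alternative
-- what changed: B first materialises the running-max and running-min prefix tables, then counts strict adjacent increases/decreases in each table, instead of A's single state-machine loop with four mutable counters.
import Mathlib
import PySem

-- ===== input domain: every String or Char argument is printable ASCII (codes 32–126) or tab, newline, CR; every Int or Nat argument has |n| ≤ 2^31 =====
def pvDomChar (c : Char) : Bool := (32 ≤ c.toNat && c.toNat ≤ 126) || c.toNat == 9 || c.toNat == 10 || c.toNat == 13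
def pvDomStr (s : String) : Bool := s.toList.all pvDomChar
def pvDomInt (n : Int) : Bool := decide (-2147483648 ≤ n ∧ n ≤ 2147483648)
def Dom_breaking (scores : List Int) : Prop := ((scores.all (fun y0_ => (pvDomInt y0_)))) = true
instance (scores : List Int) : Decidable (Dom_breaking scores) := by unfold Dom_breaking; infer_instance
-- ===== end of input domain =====

-- B replaces A's single four-counter loop by two running-extremum prefix tables
-- followed by counts of strict adjacent changes (alternative decomposition, same cost).

-- ===== PORT A =====
-- the for-loop of A over the remaining elements, state (maxi, mini, lmax, lmin)
def breakingLoop : List Int → Int → Int → Int → Int → List Int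
  | [], _, _, lmax, lmin => [lmax, lmin]
  | i :: rest, maxi, mini, lmax, lmin =>
    if i > maxi then breakingLoop rest i mini (lmax + 1) lmin
    else if i < mini then breakingLoop rest maxi i lmax (lmin + 1)
    else breakingLoop rest maxi mini lmax lmin

def breaking (scores : List Int) : List Int :=
  match scores with
  | [] => []                       -- Python raises IndexError reading the first element here; excluded by Pre_
  | h :: _ => breakingLoop scores h h 0 0

-- ===== PORT B =====
-- rmax = [(M := x if x > M else M) for x in scores]  (running-max prefix table)
def runMax : List Int → Int → List Int
  | [], _ => []
  | x :: r, M => (if x > M then x else M) :: runMax r (if x > M then x else M)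

-- rmin = [(m := x if x < m else m) for x in scores]
def runMin : List Int → Int → List Int
  | [], _ => []
  | x :: r, m => (if x < m then x else m) :: runMin r (if x < m then x else m)

-- sum(1 for a, b in zip(…, …[1:]) if b > a)
def countIncr : List (Int × Int) → Int
  | [] => 0
  | (a, b) :: r => (if b > a then 1 else 0) + countIncr r

-- sum(1 for a, b in zip(…, …[1:]) if b < a)
def countDecr : List (Int × Int) → Int
  | [] => 0
  | (a, b) :: r => (if b < a then 1 else 0) + countDecr r

def breaking_alt (scores : List Int) : List Int :=
  match scores with
  | [] => []                       -- Python raises IndexError reading the first element here; excluded by Pre_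
  | h :: _ =>
    let rmax := runMax scores h
    let rmin := runMin scores h
    let lmax := countIncr (rmax.zip (rmax.drop 1))   -- rmax[1:] is rmax.drop 1
    let lmin := countDecr (rmin.zip (rmin.drop 1))
    [lmax, lmin]

-- ===== PRECONDITION & SPEC =====
-- Pre_ excludes only the empty list, on which A (and B) raise IndexError reading the first element.
def Pre_breaking (scores : List Int) : Prop := scores ≠ []
instance (scores : List Int) : Decidable (Pre_breaking scores) := by unfold Pre_breaking; infer_instance

def pvWitness_breaking : List Int := [3, 1, 4, 1, 5]

def Spec_breaking (scores : List Int) (out : List Int) : Prop := out = breaking_alt scores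
instance (scores : List Int) (out : List Int) : Decidable (Spec_breaking scores out) := by unfold Spec_breaking; infer_instance

-- ===== CLAIM (what is proved, stated in full; the proofs are below) =====
def Claim_equal_breaking : Prop := ∀ (scores : List Int), Dom_breaking scores → Pre_breaking scores → Spec_breaking scores (breaking scores)

-- ===== LEMMAS AND PROOFS =====

-- Key invariant: with mini ≤ maxi, A's loop computes exactly the adjacent-change counts
-- of the running-extremum tables, offset by the counters carried so far.
theorem breakingLoop_eq (t : List Int) : ∀ (maxi mini lmax lmin : Int), mini ≤ maxi →
    breakingLoop t maxi mini lmax lmin =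
      [lmax + countIncr ((maxi :: runMax t maxi).zip (runMax t maxi)),
       lmin + countDecr ((mini :: runMin t mini).zip (runMin t mini))] := by
  induction t with
  | nil => intro maxi mini lmax lmin _; simp [breakingLoop, runMax, runMin, countIncr, countDecr]
  | cons x r ih =>
    intro maxi mini lmax lmin hmm
    by_cases hx : x > maxi
    · have hnm : ¬ x < mini := by omega
      have h1 : mini ≤ x := by omega
      simp [breakingLoop, runMax, runMin, countIncr, countDecr, hx, hnm, ih x mini (lmax+1) lmin h1]
      rw [add_assoc]
    · by_cases hn : x < mini
      · have h1 : x ≤ maxi := by omega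
        simp [breakingLoop, runMax, runMin, countIncr, countDecr, hx, hn, ih maxi x lmax (lmin+1) h1]
        rw [add_assoc]
      · simp [breakingLoop, runMax, runMin, countIncr, countDecr, hx, hn, ih maxi mini lmax lmin hmm]

-- ===== VERDICT (by name: the statement is the Claim_ definition above) =====
theorem breaking_spec : Claim_equal_breaking := by
  intro scores _ hpre
  unfold Spec_breaking
  match scores with
  | [] => exact absurd rfl hpre
  | h :: t =>
    have hloop := breakingLoop_eq t h h 0 0 le_rfl
    simp [breaking, breaking_alt, breakingLoop, runMax, runMin, hloop]
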